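-- pv_equiv track=rewrite | github.com/naturalstupid/PyJHora | hora/ui/horo_chart_tabs.py | _convert_1d_house_data_to_2d
-- ===== SOURCE A (Python) =====
-- def _index_containing_substring(the_list, substring):
--     for i, s in enumerate(the_list):
--         if substring in s:
--             return i
--     return -1
--
-- def _convert_1d_house_data_to_2d(rasi_1d,chart_type='south_indian'):
--     separator = '/'
--     if 'south' in chart_type.lower():
--         row_count = 4
--         col_count = 4
--         map_to_2d = [ [11,0,1,2], [10,"","",3], [9,"","",4], [8,7,6,5] ]
--     elif 'east' in chart_type.lower():
--         row_count = 3
--         col_count = 3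
--         map_to_2d = [['2'+separator+'1','0','11'+separator+'10'], ['3', "",'9' ], ['4'+separator+'5','6','7'+separator+'8']]
--     rasi_2d = [['X']*row_count for _ in range(col_count)]
--     for p,val in enumerate(rasi_1d):
--         for index, row in enumerate(map_to_2d):
--             if 'south' in chart_type.lower():
--                 i,j = [(index, row.index(p)) for index, row in enumerate(map_to_2d) if p in row][0]
--                 rasi_2d[i][j] = str(val)
--             elif 'east' in chart_type.lower():
--                 p_index = _index_containing_substring(row,str(p))
--                 if p_index != -1:
--                     i,j = (index, p_index)
--                     if rasi_2d[i][j] != 'X':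
--                         if index > 0:
--                             rasi_2d[i][j] += separator + str(val)
--                         else:
--                             rasi_2d[i][j] = str(val) + separator + rasi_2d[i][j]
--                     else:
--                         rasi_2d[i][j] = str(val)
--     for i in range(row_count):
--         for j in range(col_count):
--             if rasi_2d[i][j] == 'X':
--                 rasi_2d[i][j] = ''
--     return rasi_2d
-- ===== SOURCE B (Python) =====
-- _SOUTH_CELL_OF = [(0, 1), (0, 2), (0, 3), (1, 3), (2, 3), (3, 3),
--                   (3, 2), (3, 1), (3, 0), (2, 0), (1, 0), (0, 0)]
--
-- def _convert_1d_house_data_to_2d(rasi_1d, chart_type='south_indian'):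
--     separator = '/'
--     ct = chart_type.lower()
--     if 'south' in ct:
--         grid = [['X'] * 4 for _ in range(4)]
--         for p, val in enumerate(rasi_1d):
--             i, j = _SOUTH_CELL_OF[p]
--             grid[i][j] = str(val)
--     elif 'east' in ct:
--         rows = [['2' + separator + '1', '0', '11' + separator + '10'],
--                 ['3', '', '9'],
--                 ['4' + separator + '5', '6', '7' + separator + '8']]
--         grid = []
--         for i, row in enumerate(rows):
--             out_row = []
--             for j, cell in enumerate(row):
--                 s = 'X'
--                 for p, val in enumerate(rasi_1d):
--                     sp = str(p)
--                     if sp in cell and all(sp not in row[k] for k in range(j)):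
--                         v = str(val)
--                         if s != 'X':
--                             s = v + separator + s if i == 0 else s + separator + v
--                         else:
--                             s = v
--                 out_row.append(s)
--             grid.append(out_row)
--     else:
--         raise NameError("chart_type must contain 'south' or 'east'")
--     return [['' if c == 'X' else c for c in row] for row in grid]
-- ===== Notes on version B (the rewrite author's own statement) =====
-- stated objective: simpler
-- what changed: South chart: a fixed position table replaces A's per-value list comprehension that rescans the whole map once per map row per value; east chart: one accumulation pass per grid cell over the values replaces A's per-value scan over the map rows; the '/'-separator rules, NameError for unknown chart types and IndexError for >12 south values are kept.
import Mathlib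
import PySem

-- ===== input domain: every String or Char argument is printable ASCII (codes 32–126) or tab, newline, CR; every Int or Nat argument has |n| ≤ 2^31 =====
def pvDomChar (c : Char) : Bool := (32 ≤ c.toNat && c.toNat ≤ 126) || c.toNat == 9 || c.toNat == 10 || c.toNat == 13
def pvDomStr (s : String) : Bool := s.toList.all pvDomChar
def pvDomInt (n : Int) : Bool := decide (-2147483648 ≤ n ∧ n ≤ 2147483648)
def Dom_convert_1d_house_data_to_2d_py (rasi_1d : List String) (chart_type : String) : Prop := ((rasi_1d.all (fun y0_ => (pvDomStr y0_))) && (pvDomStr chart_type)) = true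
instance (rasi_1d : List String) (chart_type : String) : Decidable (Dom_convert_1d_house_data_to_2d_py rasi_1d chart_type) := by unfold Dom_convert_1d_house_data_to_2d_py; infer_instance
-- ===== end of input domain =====

-- B replaces A's per-value rescans of the map (south: a list comprehension over the whole map for every value and every map row;
-- east: a per-value scan over the map rows) by a direct position table for south and a single per-cell accumulation pass for east.

-- ===== PORT A =====
-- grid helpers shared by both ports: rasi_2d[i][j] read / write
def pvGet2d (g : List (List String)) (i j : Nat) : String := (g.getD i []).getD j ""
def pvSet2d (g : List (List String)) (i j : Nat) (v : String) : List (List String) :=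
  g.set i ((g.getD i []).set j v)

-- port of _index_containing_substring (the accumulator is the current enumerate index)
def pvIdxContainingSubstring : List String → String → Int → Int
  | [], _, _ => -1
  | s :: rest, sub, i => if PySem.Str.isIn sub s then i else pvIdxContainingSubstring rest sub (i + 1)

-- south map_to_2d; the '' filler cells are encoded as none (exact: p is an int, and int == '' is always False in Python)
def pvSouthMap : List (List (Option Int)) :=
  [[some 11, some 0, some 1, some 2], [some 10, none, none, some 3],
   [some 9, none, none, some 4], [some 8, some 7, some 6, some 5]]

-- east map_to_2d, built exactly as A builds it from separator = '/'
def pvEastMap : List (List String) :=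
  [["2" ++ "/" ++ "1", "0", "11" ++ "/" ++ "10"], ["3", "", "9"], ["4" ++ "/" ++ "5", "6", "7" ++ "/" ++ "8"]]

-- body of A's outer loop, south branch (the inner loop re-runs the whole comprehension for every map row)
def pvAStepSouth (g : List (List String)) (pv : Int × String) : List (List String) :=
  (PySem.List.enumerate pvSouthMap).foldl (fun g _ir =>
    match ((PySem.List.enumerate pvSouthMap).filterMap (fun ir =>
        if some pv.1 ∈ ir.2 then some (ir.1, (PySem.List.index? ir.2 (some pv.1)).getD 0) else none)).head? with
    | some ij => pvSet2d g ij.1.toNat ij.2 pv.2   -- str(val) = val for strings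
    | none => g                                    -- Python raises IndexError ([...][0] on []); outside Pre_
    ) g

-- body of A's inner loop over the east map rows, for one (p, val) pair
def pvAEastRowUpd (pv : Int × String) (g : List (List String)) (ir : Int × List String) : List (List String) :=
  let p_index := pvIdxContainingSubstring ir.2 (PySem.Int.toStr pv.1) 0
  if p_index ≠ -1 then
    if pvGet2d g ir.1.toNat p_index.toNat ≠ "X" then
      if ir.1 > 0 then pvSet2d g ir.1.toNat p_index.toNat (pvGet2d g ir.1.toNat p_index.toNat ++ "/" ++ pv.2)
      else pvSet2d g ir.1.toNat p_index.toNat (pv.2 ++ "/" ++ pvGet2d g ir.1.toNat p_index.toNat)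
    else pvSet2d g ir.1.toNat p_index.toNat pv.2
  else g

-- body of A's outer loop, east branch
def pvAStepEast (g : List (List String)) (pv : Int × String) : List (List String) :=
  (PySem.List.enumerate pvEastMap).foldl (pvAEastRowUpd pv) g

-- A's final 'X' → '' cleanup: inner loop over one row index i, then the loop over all rows
def pvCleanupRow (col_count : Nat) (g : List (List String)) (i : Nat) : List (List String) :=
  (List.range col_count).foldl (fun g j =>
    if pvGet2d g i j == "X" then pvSet2d g i j "" else g) g
def pvCleanup (g : List (List String)) (row_count col_count : Nat) : List (List String) :=
  (List.range row_count).foldl (pvCleanupRow col_count) g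

-- 'south'/'east' in chart_type.lower() is re-tested inside A's loops but never changes; it is hoisted once here
def convert_1d_house_data_to_2d_py (rasi_1d : List String) (chart_type : String) : List (List String) :=
  if PySem.Str.isIn "south" (PySem.Str.lower chart_type) then
    pvCleanup ((PySem.List.enumerate rasi_1d).foldl pvAStepSouth
      (List.replicate 4 (List.replicate 4 "X"))) 4 4
  else if PySem.Str.isIn "east" (PySem.Str.lower chart_type) then
    pvCleanup ((PySem.List.enumerate rasi_1d).foldl pvAStepEast
      (List.replicate 3 (List.replicate 3 "X"))) 3 3
  else []  -- Python raises NameError here; outside Pre_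

-- ===== PORT B =====
-- B's fixed position table: _SOUTH_CELL_OF[p] = grid cell of house position p
def pvSouthCellOf : List (Nat × Nat) :=
  [(0, 1), (0, 2), (0, 3), (1, 3), (2, 3), (3, 3), (3, 2), (3, 1), (3, 0), (2, 0), (1, 0), (0, 0)]

-- B's south loop body: one table lookup per value (enumerate indices are ≥ 0, so .toNat is exact)
def pvBStepSouth (g : List (List String)) (pv : Int × String) : List (List String) :=
  match pvSouthCellOf[pv.1.toNat]? with
  | some ij => pvSet2d g ij.1 ij.2 pv.2
  | none => g          -- Python: cell_of[p] raises IndexError when p ≥ 12; outside Pre_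

-- B's per-cell accumulation step over one (p, val) pair (row index i, row, cell index j, cell text)
def pvBStepEastCell (i : Int) (row : List String) (j : Nat) (cell : String) (s : String) (pv : Int × String) : String :=
  let sp := PySem.Int.toStr pv.1
  if PySem.Str.isIn sp cell && (List.range j).all (fun k => !PySem.Str.isIn sp (row.getD k "")) then
    if s ≠ "X" then (if i == 0 then pv.2 ++ "/" ++ s else s ++ "/" ++ pv.2) else pv.2
  else s

def convert_1d_house_data_to_2d_py_alt (rasi_1d : List String) (chart_type : String) : List (List String) :=
  let grid :=
    if PySem.Str.isIn "south" (PySem.Str.lower chart_type) then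
      (PySem.List.enumerate rasi_1d).foldl pvBStepSouth (List.replicate 4 (List.replicate 4 "X"))
    else if PySem.Str.isIn "east" (PySem.Str.lower chart_type) then
      -- Source B builds the same east row literals from separator = '/'; the shared constant pvEastMap is that literal
      (PySem.List.enumerate pvEastMap).map (fun ir =>
        (PySem.List.enumerate ir.2).map (fun jc =>
          (PySem.List.enumerate rasi_1d).foldl (pvBStepEastCell ir.1 ir.2 jc.1.toNat jc.2) "X"))
    else []  -- Python raises NameError here; outside Pre_
  grid.map (fun row => row.map (fun c => if c == "X" then "" else c))

-- ===== PRECONDITION & SPEC =====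
-- Pre_ excludes exactly the inputs where Python A raises: an IndexError in the south branch when more than
-- 12 house values are given, and a NameError when chart_type names neither a 'south' nor an 'east' chart.
def Pre_convert_1d_house_data_to_2d_py (rasi_1d : List String) (chart_type : String) : Prop :=
  (PySem.Str.isIn "south" (PySem.Str.lower chart_type) = true → rasi_1d.length ≤ 12) ∧
  (PySem.Str.isIn "south" (PySem.Str.lower chart_type) = true ∨ PySem.Str.isIn "east" (PySem.Str.lower chart_type) = true)
instance (rasi_1d : List String) (chart_type : String) : Decidable (Pre_convert_1d_house_data_to_2d_py rasi_1d chart_type) := by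
  unfold Pre_convert_1d_house_data_to_2d_py; infer_instance

def pvWitness_convert_1d_house_data_to_2d_py : List String × String := (["Sun", "Moon/Mars", ""], "south_indian")

def Spec_convert_1d_house_data_to_2d_py (rasi_1d : List String) (chart_type : String) (out : List (List String)) : Prop := out = convert_1d_house_data_to_2d_py_alt rasi_1d chart_type
instance (rasi_1d : List String) (chart_type : String) (out : List (List String)) : Decidable (Spec_convert_1d_house_data_to_2d_py rasi_1d chart_type out) := by unfold Spec_convert_1d_house_data_to_2d_py; infer_instance

-- ===== CLAIM (what is proved, stated in full; the proofs are below) =====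
def Claim_equal_convert_1d_house_data_to_2d_py : Prop := ∀ (rasi_1d : List String) (chart_type : String), Dom_convert_1d_house_data_to_2d_py rasi_1d chart_type → Pre_convert_1d_house_data_to_2d_py rasi_1d chart_type → Spec_convert_1d_house_data_to_2d_py rasi_1d chart_type (convert_1d_house_data_to_2d_py rasi_1d chart_type)

-- ===== LEMMAS AND PROOFS =====
lemma pvSet2d_idem (g : List (List String)) (i j : Nat) (v : String) :
    pvSet2d (pvSet2d g i j v) i j v = pvSet2d g i j v := by
  by_cases h : i < g.length
  · simp [pvSet2d, List.getD, List.getElem?_set_eq_of_lt _ h, List.set_set]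
  · simp [pvSet2d, List.set_eq_of_length_le (by omega : g.length ≤ i)]

lemma pv_step_south_big (n : Nat) (v : String) (g : List (List String)) :
    pvAStepSouth g (((n + 12 : Nat) : Int), v) = pvBStepSouth g (((n + 12 : Nat) : Int), v) := by
  have h1 : ¬ (some ((n:Int) + 12) ∈ [some (11:Int), some 0, some 1, some 2]) := by simp; omega
  have h2 : ¬ (some ((n:Int) + 12) ∈ [some (10:Int), none, none, some 3]) := by simp; omega
  have h3 : ¬ (some ((n:Int) + 12) ∈ [some (9:Int), none, none, some 4]) := by simp; omega
  have h4 : ¬ (some ((n:Int) + 12) ∈ [some (8:Int), some 7, some 6, some 5]) := by simp; omega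
  have hb : pvSouthCellOf[((n:Int) + 12).toNat]? = none := by
    apply List.getElem?_eq_none; simp [pvSouthCellOf]; omega
  have he : ((n + 12 : Nat) : Int) = (n : Int) + 12 := by omega
  rw [he]
  simp [pvAStepSouth, pvBStepSouth, pvSouthMap, PySem.List.enumerate, h1, h2, h3, h4, hb]

lemma pv_step_south_eq (pv : Int × String) (hp : 0 ≤ pv.1) (g : List (List String)) :
    pvAStepSouth g pv = pvBStepSouth g pv := by
  obtain ⟨p, v⟩ := pv
  obtain ⟨n, rfl⟩ : ∃ m : Nat, p = (m : Int) := ⟨p.toNat, (Int.toNat_of_nonneg hp).symm⟩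
  rcases n with _|_|_|_|_|_|_|_|_|_|_|_|n
  all_goals try
    (simp [pvAStepSouth, pvBStepSouth, pvSouthMap, pvSouthCellOf, pvSet2d_idem,
           PySem.List.enumerate, PySem.List.index?, List.idxOf?, List.findIdx?, List.findIdx?.go]; done)
  exact pv_step_south_big n v g
lemma pv_east_row0 (pv : Int × String) (a b c : String) (r1 r2 : List String) :
    pvAEastRowUpd pv [[a,b,c],r1,r2] (0, ["2" ++ "/" ++ "1", "0", "11" ++ "/" ++ "10"]) =
    [[pvBStepEastCell 0 ["2" ++ "/" ++ "1", "0", "11" ++ "/" ++ "10"] 0 ("2" ++ "/" ++ "1") a pv,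
      pvBStepEastCell 0 ["2" ++ "/" ++ "1", "0", "11" ++ "/" ++ "10"] 1 "0" b pv,
      pvBStepEastCell 0 ["2" ++ "/" ++ "1", "0", "11" ++ "/" ++ "10"] 2 ("11" ++ "/" ++ "10") c pv], r1, r2] := by
  by_cases h0 : PySem.Chars.isIn (PySem.Int.toChars pv.1) ['2','/','1'] = true <;>
  by_cases h1 : PySem.Chars.isIn (PySem.Int.toChars pv.1) ['0'] = true <;>
  by_cases h2 : PySem.Chars.isIn (PySem.Int.toChars pv.1) ['1','1','/','1','0'] = true <;>
  simp [pvAEastRowUpd, pvBStepEastCell, pvIdxContainingSubstring, pvGet2d, pvSet2d,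
        List.range_succ, h0, h1, h2] <;> (try (split_ifs <;> rfl))
lemma pv_east_row1 (pv : Int × String) (d e f : String) (r0 r2 : List String) :
    pvAEastRowUpd pv [r0,[d,e,f],r2] (1, ["3", "", "9"]) =
    [r0, [pvBStepEastCell 1 ["3", "", "9"] 0 "3" d pv,
      pvBStepEastCell 1 ["3", "", "9"] 1 "" e pv,
      pvBStepEastCell 1 ["3", "", "9"] 2 "9" f pv], r2] := by
  by_cases h0 : PySem.Chars.isIn (PySem.Int.toChars pv.1) ['3'] = true <;>
  by_cases h1 : PySem.Chars.isIn (PySem.Int.toChars pv.1) ([] : List Char) = true <;>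
  by_cases h2 : PySem.Chars.isIn (PySem.Int.toChars pv.1) ['9'] = true <;>
  simp [pvAEastRowUpd, pvBStepEastCell, pvIdxContainingSubstring, pvGet2d, pvSet2d,
        List.range_succ, h0, h1, h2] <;> (try (split_ifs <;> rfl))
lemma pv_east_row2 (pv : Int × String) (x y z : String) (r0 r1 : List String) :
    pvAEastRowUpd pv [r0,r1,[x,y,z]] (2, ["4" ++ "/" ++ "5", "6", "7" ++ "/" ++ "8"]) =
    [r0, r1, [pvBStepEastCell 2 ["4" ++ "/" ++ "5", "6", "7" ++ "/" ++ "8"] 0 ("4" ++ "/" ++ "5") x pv,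
      pvBStepEastCell 2 ["4" ++ "/" ++ "5", "6", "7" ++ "/" ++ "8"] 1 "6" y pv,
      pvBStepEastCell 2 ["4" ++ "/" ++ "5", "6", "7" ++ "/" ++ "8"] 2 ("7" ++ "/" ++ "8") z pv]] := by
  by_cases h0 : PySem.Chars.isIn (PySem.Int.toChars pv.1) ['4','/','5'] = true <;>
  by_cases h1 : PySem.Chars.isIn (PySem.Int.toChars pv.1) ['6'] = true <;>
  by_cases h2 : PySem.Chars.isIn (PySem.Int.toChars pv.1) ['7','/','8'] = true <;>
  simp [pvAEastRowUpd, pvBStepEastCell, pvIdxContainingSubstring, pvGet2d, pvSet2d,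
        List.range_succ, h0, h1, h2] <;> (try (split_ifs <;> rfl))
lemma pv_east_step (pv : Int × String) (a b c d e f g h i : String) :
    pvAStepEast [[a,b,c],[d,e,f],[g,h,i]] pv =
    [[pvBStepEastCell 0 ["2" ++ "/" ++ "1", "0", "11" ++ "/" ++ "10"] 0 ("2" ++ "/" ++ "1") a pv,
      pvBStepEastCell 0 ["2" ++ "/" ++ "1", "0", "11" ++ "/" ++ "10"] 1 "0" b pv,
      pvBStepEastCell 0 ["2" ++ "/" ++ "1", "0", "11" ++ "/" ++ "10"] 2 ("11" ++ "/" ++ "10") c pv],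
     [pvBStepEastCell 1 ["3", "", "9"] 0 "3" d pv,
      pvBStepEastCell 1 ["3", "", "9"] 1 "" e pv,
      pvBStepEastCell 1 ["3", "", "9"] 2 "9" f pv],
     [pvBStepEastCell 2 ["4" ++ "/" ++ "5", "6", "7" ++ "/" ++ "8"] 0 ("4" ++ "/" ++ "5") g pv,
      pvBStepEastCell 2 ["4" ++ "/" ++ "5", "6", "7" ++ "/" ++ "8"] 1 "6" h pv,
      pvBStepEastCell 2 ["4" ++ "/" ++ "5", "6", "7" ++ "/" ++ "8"] 2 ("7" ++ "/" ++ "8") i pv]] := by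
  show (PySem.List.enumerate pvEastMap).foldl (pvAEastRowUpd pv) [[a,b,c],[d,e,f],[g,h,i]] = _
  rw [show PySem.List.enumerate pvEastMap =
      [((0:Int), ["2" ++ "/" ++ "1", "0", "11" ++ "/" ++ "10"]), ((1:Int), ["3", "", "9"]),
       ((2:Int), ["4" ++ "/" ++ "5", "6", "7" ++ "/" ++ "8"])] from rfl]
  rw [List.foldl_cons, pv_east_row0, List.foldl_cons, pv_east_row1, List.foldl_cons, pv_east_row2,
      List.foldl_nil]

lemma pv_east_fold (l : List (Int × String)) :
    ∀ (a b c d e f g h i : String),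
    l.foldl pvAStepEast [[a,b,c],[d,e,f],[g,h,i]] =
    [[l.foldl (pvBStepEastCell 0 ["2" ++ "/" ++ "1", "0", "11" ++ "/" ++ "10"] 0 ("2" ++ "/" ++ "1")) a,
      l.foldl (pvBStepEastCell 0 ["2" ++ "/" ++ "1", "0", "11" ++ "/" ++ "10"] 1 "0") b,
      l.foldl (pvBStepEastCell 0 ["2" ++ "/" ++ "1", "0", "11" ++ "/" ++ "10"] 2 ("11" ++ "/" ++ "10")) c],
     [l.foldl (pvBStepEastCell 1 ["3", "", "9"] 0 "3") d,
      l.foldl (pvBStepEastCell 1 ["3", "", "9"] 1 "") e,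
      l.foldl (pvBStepEastCell 1 ["3", "", "9"] 2 "9") f],
     [l.foldl (pvBStepEastCell 2 ["4" ++ "/" ++ "5", "6", "7" ++ "/" ++ "8"] 0 ("4" ++ "/" ++ "5")) g,
      l.foldl (pvBStepEastCell 2 ["4" ++ "/" ++ "5", "6", "7" ++ "/" ++ "8"] 1 "6") h,
      l.foldl (pvBStepEastCell 2 ["4" ++ "/" ++ "5", "6", "7" ++ "/" ++ "8"] 2 ("7" ++ "/" ++ "8")) i]] := by
  induction l with
  | nil => intro a b c d e f g h i; rfl
  | cons pv t ih =>
    intro a b c d e f g h i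
    simp only [List.foldl_cons, pv_east_step]
    exact ih _ _ _ _ _ _ _ _ _


lemma pv_crow3_0 (x y z : String) (r1 r2 : List String) :
    pvCleanupRow 3 [[x,y,z],r1,r2] 0 =
    [[if x == "X" then "" else x, if y == "X" then "" else y, if z == "X" then "" else z],r1,r2] := by
  simp only [pvCleanupRow, pvGet2d, pvSet2d, List.range_succ, List.range_zero, List.nil_append,
    List.cons_append, List.foldl_cons, List.foldl_nil]
  split_ifs <;> simp_all
lemma pv_crow3_1 (x y z : String) (r0 r2 : List String) :
    pvCleanupRow 3 [r0,[x,y,z],r2] 1 =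
    [r0,[if x == "X" then "" else x, if y == "X" then "" else y, if z == "X" then "" else z],r2] := by
  simp only [pvCleanupRow, pvGet2d, pvSet2d, List.range_succ, List.range_zero, List.nil_append,
    List.cons_append, List.foldl_cons, List.foldl_nil]
  split_ifs <;> simp_all
lemma pv_crow3_2 (x y z : String) (r0 r1 : List String) :
    pvCleanupRow 3 [r0,r1,[x,y,z]] 2 =
    [r0,r1,[if x == "X" then "" else x, if y == "X" then "" else y, if z == "X" then "" else z]] := by
  simp only [pvCleanupRow, pvGet2d, pvSet2d, List.range_succ, List.range_zero, List.nil_append,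
    List.cons_append, List.foldl_cons, List.foldl_nil]
  split_ifs <;> simp_all
lemma pv_clean3 (x y z u v w q r s : String) :
    pvCleanup [[x,y,z],[u,v,w],[q,r,s]] 3 3 =
    [[x,y,z],[u,v,w],[q,r,s]].map (List.map (fun c => if c == "X" then "" else c)) := by
  show (List.range 3).foldl (pvCleanupRow 3) _ = _
  rw [show List.range 3 = [0,1,2] from rfl]
  rw [List.foldl_cons, pv_crow3_0, List.foldl_cons, pv_crow3_1, List.foldl_cons, pv_crow3_2,
      List.foldl_nil]
  rfl
lemma pv_crow4_0 (x y z w : String) (r1 r2 r3 : List String) :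
    pvCleanupRow 4 [[x,y,z,w],r1,r2,r3] 0 =
    [[if x == "X" then "" else x, if y == "X" then "" else y, if z == "X" then "" else z,
      if w == "X" then "" else w],r1,r2,r3] := by
  simp only [pvCleanupRow, pvGet2d, pvSet2d, List.range_succ, List.range_zero, List.nil_append,
    List.cons_append, List.foldl_cons, List.foldl_nil]
  split_ifs <;> simp_all
lemma pv_crow4_1 (x y z w : String) (r0 r2 r3 : List String) :
    pvCleanupRow 4 [r0,[x,y,z,w],r2,r3] 1 =
    [r0,[if x == "X" then "" else x, if y == "X" then "" else y, if z == "X" then "" else z,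
      if w == "X" then "" else w],r2,r3] := by
  simp only [pvCleanupRow, pvGet2d, pvSet2d, List.range_succ, List.range_zero, List.nil_append,
    List.cons_append, List.foldl_cons, List.foldl_nil]
  split_ifs <;> simp_all
lemma pv_crow4_2 (x y z w : String) (r0 r1 r3 : List String) :
    pvCleanupRow 4 [r0,r1,[x,y,z,w],r3] 2 =
    [r0,r1,[if x == "X" then "" else x, if y == "X" then "" else y, if z == "X" then "" else z,
      if w == "X" then "" else w],r3] := by
  simp only [pvCleanupRow, pvGet2d, pvSet2d, List.range_succ, List.range_zero, List.nil_append,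
    List.cons_append, List.foldl_cons, List.foldl_nil]
  split_ifs <;> simp_all
lemma pv_crow4_3 (x y z w : String) (r0 r1 r2 : List String) :
    pvCleanupRow 4 [r0,r1,r2,[x,y,z,w]] 3 =
    [r0,r1,r2,[if x == "X" then "" else x, if y == "X" then "" else y, if z == "X" then "" else z,
      if w == "X" then "" else w]] := by
  simp only [pvCleanupRow, pvGet2d, pvSet2d, List.range_succ, List.range_zero, List.nil_append,
    List.cons_append, List.foldl_cons, List.foldl_nil]
  split_ifs <;> simp_all
lemma pv_clean4 (x0 x1 x2 x3 x4 x5 x6 x7 x8 x9 x10 x11 x12 x13 x14 x15 : String) :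
    pvCleanup [[x0,x1,x2,x3],[x4,x5,x6,x7],[x8,x9,x10,x11],[x12,x13,x14,x15]] 4 4 =
    [[x0,x1,x2,x3],[x4,x5,x6,x7],[x8,x9,x10,x11],[x12,x13,x14,x15]].map
      (List.map (fun c => if c == "X" then "" else c)) := by
  show (List.range 4).foldl (pvCleanupRow 4) _ = _
  rw [show List.range 4 = [0,1,2,3] from rfl]
  rw [List.foldl_cons, pv_crow4_0, List.foldl_cons, pv_crow4_1, List.foldl_cons, pv_crow4_2,
      List.foldl_cons, pv_crow4_3, List.foldl_nil]
  rfl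

lemma pv_enum_nonneg (xs : List String) : ∀ pv ∈ PySem.List.enumerate xs, 0 ≤ pv.1 := by
  intro pv h
  rw [PySem.List.mem_enumerate_iff] at h
  obtain ⟨k, hk, rfl⟩ := h
  simp

lemma pv_south_fold (l : List (Int × String)) (hl : ∀ pv ∈ l, 0 ≤ pv.1) :
    ∀ g, l.foldl pvAStepSouth g = l.foldl pvBStepSouth g := by
  induction l with
  | nil => intro g; rfl
  | cons pv t ih =>
    intro g
    rw [List.foldl_cons, List.foldl_cons, pv_step_south_eq pv (hl pv (by simp))]
    exact ih (fun q hq => hl q (by simp [hq])) _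

def pvIsGrid44 (g : List (List String)) : Prop :=
  ∃ x0 x1 x2 x3 x4 x5 x6 x7 x8 x9 x10 x11 x12 x13 x14 x15 : String,
    g = [[x0,x1,x2,x3],[x4,x5,x6,x7],[x8,x9,x10,x11],[x12,x13,x14,x15]]

lemma pv_bstep_south_grid44 (g : List (List String)) (pv : Int × String) (hg : pvIsGrid44 g) :
    pvIsGrid44 (pvBStepSouth g pv) := by
  obtain ⟨x0,x1,x2,x3,x4,x5,x6,x7,x8,x9,x10,x11,x12,x13,x14,x15,rfl⟩ := hg
  rcases h : pvSouthCellOf[pv.1.toNat]? with _ | ij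
  · simp only [pvBStepSouth, h]
    exact ⟨_, _, _, _, _, _, _, _, _, _, _, _, _, _, _, _, rfl⟩
  · have hm : ij ∈ pvSouthCellOf := List.mem_of_getElem? h
    simp only [pvSouthCellOf, List.mem_cons, List.not_mem_nil, or_false] at hm
    rcases hm with rfl|rfl|rfl|rfl|rfl|rfl|rfl|rfl|rfl|rfl|rfl|rfl <;>
      (simp only [pvBStepSouth, h, pvSet2d, List.set, List.getD, List.getElem?_cons_zero,
        List.getElem?_cons_succ, Option.getD_some]
       exact ⟨_, _, _, _, _, _, _, _, _, _, _, _, _, _, _, _, rfl⟩)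

lemma pv_fold_south_grid44 (l : List (Int × String)) :
    ∀ g, pvIsGrid44 g → pvIsGrid44 (l.foldl pvBStepSouth g) := by
  induction l with
  | nil => intro g hg; exact hg
  | cons pv t ih =>
    intro g hg
    rw [List.foldl_cons]
    exact ih _ (pv_bstep_south_grid44 g pv hg)

-- ===== VERDICT (by name: the statement is the Claim_ definition above) =====
theorem convert_1d_house_data_to_2d_py_spec : Claim_equal_convert_1d_house_data_to_2d_py := by
  intro rasi_1d chart_type _hDom _hPre
  unfold Spec_convert_1d_house_data_to_2d_py
  unfold convert_1d_house_data_to_2d_py convert_1d_house_data_to_2d_py_alt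
  by_cases hs : PySem.Str.isIn "south" (PySem.Str.lower chart_type) = true
  · simp only [hs, if_true]
    rw [pv_south_fold _ (pv_enum_nonneg rasi_1d)]
    have h44 : pvIsGrid44 ((PySem.List.enumerate rasi_1d).foldl pvBStepSouth
        (List.replicate 4 (List.replicate 4 "X"))) := by
      apply pv_fold_south_grid44
      exact ⟨_, _, _, _, _, _, _, _, _, _, _, _, _, _, _, _, rfl⟩
    obtain ⟨x0,x1,x2,x3,x4,x5,x6,x7,x8,x9,x10,x11,x12,x13,x14,x15,heq⟩ := h44
    rw [heq, pv_clean4]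
  · by_cases he : PySem.Str.isIn "east" (PySem.Str.lower chart_type) = true
    · simp only [hs, he, if_true, if_false, Bool.false_eq_true]
      rw [show List.replicate 3 (List.replicate 3 "X") =
          [["X","X","X"],["X","X","X"],["X","X","X"]] from rfl]
      rw [pv_east_fold, pv_clean3]
      rfl
    · simp only [hs, he, if_false, Bool.false_eq_true]
      rfl
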